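-- pv_equiv track=rewrite | github.com/fernandoaestrella/nlp-final-project | all_together.py | create_training_feature_vectors
-- ===== SOURCE A (Python) =====
-- from collections import Counter
--
-- def document_features_rc(document, listofwords):
--     features = Counter(document)
--     features_list = []
--     for word in listofwords:
--         features_list.append(features[word])
--     # and this is what we feed into the classifier
--     return features_list
--
-- def document_features_bc(document, listofwords):
--     document_words = set(document)
--     features_list = []
--     for word in listofwords:
--         features_list.append(word in document_words)
--     return features_list
--
-- def create_training_feature_vectors(training_set, wordlist, model):
--     training_features = []
--     if model == 'bc':
--         for document in training_set:
--             training_features.append(document_features_bc(document[0], wordlist))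
--     elif model == 'rc':
--         for document in training_set:
--             training_features.append(document_features_rc(document[0], wordlist))
--     return training_features
-- ===== SOURCE B (Python) =====
-- def create_training_feature_vectors(training_set, wordlist, model):
--     # Invert the loop: build word -> positions index once, then scan each
--     # document's tokens instead of scanning the wordlist per document.
--     if model not in ('bc', 'rc'):
--         return []
--     index = {}
--     for i, w in enumerate(wordlist):
--         index[w] = index.get(w, []) + [i]
--     n = len(wordlist)
--     result = []
--     for document in training_set:
--         if model == 'rc':
--             vec = [0] * n
--             for tok in document[0]:
--                 for p in index.get(tok, ()):
--                     vec[p] += 1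
--         else:
--             vec = [False] * n
--             for tok in document[0]:
--                 for p in index.get(tok, ()):
--                     vec[p] = True
--         result.append(vec)
--     return result
-- ===== Notes on version B (the rewrite author's own statement) =====
-- stated objective: alternative
-- what changed: B builds a word->positions inverted index over the wordlist once and then, per document, fills an in-place vector by scanning the document's tokens, instead of A's per-document Counter/set built and then scanned per wordlist entry; Pre_ excludes model = 'bc', where A (and B alike) returns lists of booleans rather than values of the declared list[list[int]] type.
-- outside the precondition, e.g. on create_training_feature_vectors([(['a'], 'x')], ['a'], 'bc'): A returns [[True]], B returns [[True]]
import Mathlib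
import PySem

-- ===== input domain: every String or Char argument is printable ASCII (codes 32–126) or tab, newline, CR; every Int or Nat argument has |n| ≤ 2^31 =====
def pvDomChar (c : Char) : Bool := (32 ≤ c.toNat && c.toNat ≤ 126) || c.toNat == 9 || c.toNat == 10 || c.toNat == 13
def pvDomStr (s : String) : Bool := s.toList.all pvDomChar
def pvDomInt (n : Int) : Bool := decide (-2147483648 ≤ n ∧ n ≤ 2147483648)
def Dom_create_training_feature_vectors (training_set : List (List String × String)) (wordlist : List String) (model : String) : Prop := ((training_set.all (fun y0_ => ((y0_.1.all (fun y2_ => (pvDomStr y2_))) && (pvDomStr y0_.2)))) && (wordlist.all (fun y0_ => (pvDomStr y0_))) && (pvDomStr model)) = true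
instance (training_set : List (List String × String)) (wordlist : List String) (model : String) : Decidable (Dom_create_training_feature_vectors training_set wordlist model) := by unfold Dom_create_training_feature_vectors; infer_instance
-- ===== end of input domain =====

-- B replaces A's per-document Counter/set scanned over the wordlist by a single word->positions
-- inverted index over the wordlist plus an in-place vector filled by scanning each document's tokens
-- (alternative decomposition, same results).


-- ===== PORT A =====
def document_features_rc_port (document : List String) (listofwords : List String) : List Int :=
  let features := PySem.Dict.counter document
  listofwords.foldl (fun acc w => acc ++ [features.getD w 0]) []

def document_features_bc_port (document : List String) (listofwords : List String) : List Int :=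
  let document_words : PySem.Set String := PySem.Set.ofList document
  listofwords.foldl (fun acc w => acc ++ [if PySem.Set.contains document_words w then (1 : Int) else 0]) []

def create_training_feature_vectors (training_set : List (List String × String)) (wordlist : List String) (model : String) : List (List Int) :=
  if model = "bc" then
    training_set.foldl (fun acc d => acc ++ [document_features_bc_port d.1 wordlist]) []
  else if model = "rc" then
    training_set.foldl (fun acc d => acc ++ [document_features_rc_port d.1 wordlist]) []
  else []

-- ===== PORT B =====
-- index[w] = index.get(w, []) + [i]  is  Dict.modify w [] (· ++ [i])
def pvBuildIndex (wordlist : List String) : PySem.Dict String (List Int) :=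
  (PySem.List.enumerate wordlist).foldl (fun d p => d.modify p.2 [] (· ++ [p.1])) PySem.Dict.empty

-- vec[p] += 1  (p always in range in B, so pySetD/pyGetD are exact here)
def pvBumpRc (v : List Int) (p : Int) : List Int :=
  PySem.List.pySetD v p (PySem.List.pyGetD v p 0 + 1)

-- vec[p] = True  (True is 1 at type Int)
def pvBumpBc (v : List Int) (p : Int) : List Int :=
  PySem.List.pySetD v p 1

def create_training_feature_vectors_alt (training_set : List (List String × String)) (wordlist : List String) (model : String) : List (List Int) :=
  if model ≠ "bc" ∧ model ≠ "rc" then []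
  else
    let index := pvBuildIndex wordlist
    let n := wordlist.length
    training_set.foldl (fun res doc =>
      let vec :=
        if model = "rc" then
          doc.1.foldl (fun v tok => (index.getD tok []).foldl pvBumpRc v) (List.replicate n (0 : Int))
        else
          doc.1.foldl (fun v tok => (index.getD tok []).foldl pvBumpBc v) (List.replicate n (0 : Int))
      res ++ [vec]) []

-- ===== PRECONDITION & SPEC =====
-- Pre_ excludes model = "bc": there Python A returns lists of booleans (True/False), not values of the
-- declared return type list[list[int]], so the typed claim cannot cover those inputs (B behaves the same there).
def Pre_create_training_feature_vectors (training_set : List (List String × String)) (wordlist : List String) (model : String) : Prop := model ≠ "bc"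
instance (training_set : List (List String × String)) (wordlist : List String) (model : String) : Decidable (Pre_create_training_feature_vectors training_set wordlist model) := by unfold Pre_create_training_feature_vectors; infer_instance
def pvWitness_create_training_feature_vectors : (List (List String × String)) × List String × String := ([(["a", "b", "a"], "pos")], ["a", "b", "c"], "rc")

def Spec_create_training_feature_vectors (training_set : List (List String × String)) (wordlist : List String) (model : String) (out : List (List Int)) : Prop := out = create_training_feature_vectors_alt training_set wordlist model
instance (training_set : List (List String × String)) (wordlist : List String) (model : String) (out : List (List Int)) : Decidable (Spec_create_training_feature_vectors training_set wordlist model out) := by unfold Spec_create_training_feature_vectors; infer_instance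

-- ===== CLAIM (what is proved, stated in full; the proofs are below) =====
def Claim_equal_create_training_feature_vectors : Prop := ∀ (training_set : List (List String × String)) (wordlist : List String) (model : String), Dom_create_training_feature_vectors training_set wordlist model → Pre_create_training_feature_vectors training_set wordlist model → Spec_create_training_feature_vectors training_set wordlist model (create_training_feature_vectors training_set wordlist model)

-- ===== LEMMAS AND PROOFS =====

def pvPos (wordlist : List String) (w : String) : List Int :=
  ((PySem.List.enumerate wordlist).filter (fun p => p.2 == w)).map (·.1)

lemma pv_mem_enumerate {α : Type} (xs : List α) (s j : Int) (x : α) :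
    (j, x) ∈ PySem.List.enumerate xs s ↔ ∃ k : Nat, k < xs.length ∧ j = s + k ∧ xs[k]? = some x := by
  induction xs generalizing s with
  | nil => simp [PySem.List.enumerate_nil]
  | cons a xs ih =>
    simp only [PySem.List.enumerate_cons, List.mem_cons, ih, List.length_cons, Prod.mk.injEq]
    constructor
    · rintro (⟨hj, hy⟩ | ⟨k, hk, hj, hg⟩)
      · exact ⟨0, by omega, by omega, by simp [hy]⟩
      · exact ⟨k + 1, by omega, by push_cast; omega, by simpa using hg⟩
    · rintro ⟨k, hk, hj, hg⟩
      cases k with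
      | zero => exact Or.inl ⟨by omega, by simpa using hg.symm⟩
      | succ k => exact Or.inr ⟨k, by omega, by push_cast at hj ⊢; omega, by simpa using hg⟩

lemma pv_index_getD (wl : List String) (w : String) :
    (pvBuildIndex wl).getD w [] = pvPos wl w := by
  unfold pvBuildIndex pvPos
  have h2 : (PySem.List.enumerate wl).foldl (fun d p => d.modify p.2 [] (· ++ [p.1])) PySem.Dict.empty
      = ((PySem.List.enumerate wl).map (fun p => (p.2, p.1))).foldl
          (fun (d : PySem.Dict String (List Int)) q => d.modify q.1 [] (· ++ [q.2])) PySem.Dict.empty := by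
    simp only [List.foldl_map]
  rw [h2, PySem.Dict.getD_foldl_modify_append]
  simp [List.filter_map, List.map_map, Function.comp_def, PySem.Dict.getD, PySem.Dict.get?, PySem.Dict.empty]

lemma pv_pos_bound (wl : List String) (w : String) (p : Int) (hp : p ∈ pvPos wl w) :
    0 ≤ p ∧ p < wl.length := by
  unfold pvPos at hp
  simp only [List.mem_map, List.mem_filter] at hp
  obtain ⟨q, ⟨hm, -⟩, rfl⟩ := hp
  obtain ⟨k, hk, hjk, -⟩ := (pv_mem_enumerate wl 0 q.1 q.2).1 (by simpa using hm)
  omega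

lemma pv_pos_nodup (wl : List String) (w : String) : (pvPos wl w).Nodup := by
  have hsub : ((PySem.List.enumerate wl).filter (fun p => p.2 == w)).Sublist (PySem.List.enumerate wl) :=
    List.filter_sublist
  have : (pvPos wl w).Sublist ((PySem.List.enumerate wl).map (·.1)) := hsub.map _
  have hnd : ((PySem.List.enumerate wl).map (·.1)).Nodup := by
    rw [PySem.List.map_fst_enumerate]
    exact PySem.List.nodup_pyRange_one _ _
  exact hnd.sublist this

lemma pv_pos_mem_iff (wl : List String) (w : String) (j : Nat) (hj : j < wl.length) :
    ((j : Int) ∈ pvPos wl w) ↔ wl[j] = w := by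
  unfold pvPos
  simp only [List.mem_map, List.mem_filter]
  constructor
  · rintro ⟨q, ⟨hm, hx⟩, hq1⟩
    obtain ⟨k, hk, hjk, hg⟩ := (pv_mem_enumerate wl 0 q.1 q.2).1 (by simpa using hm)
    have hkj : k = j := by omega
    subst hkj
    rw [List.getElem?_eq_getElem hk] at hg
    have : wl[k] = q.2 := by simpa using hg
    rw [this]
    simpa using hx
  · intro hw
    refine ⟨((j : Int), w), ⟨?_, by simp⟩, rfl⟩
    rw [pv_mem_enumerate]
    exact ⟨j, hj, by omega, by rw [List.getElem?_eq_getElem hj, hw]⟩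

lemma pv_pos_count (wl : List String) (w : String) (j : Nat) (hj : j < wl.length) :
    (pvPos wl w).count (j : Int) = if wl[j] = w then 1 else 0 := by
  by_cases h : wl[j] = w
  · rw [if_pos h]
    exact List.count_eq_one_of_mem (pv_pos_nodup wl w) ((pv_pos_mem_iff wl w j hj).2 h)
  · rw [if_neg h]
    exact List.count_eq_zero_of_not_mem (fun hm => h ((pv_pos_mem_iff wl w j hj).1 hm))

lemma pv_len_fold_rc (ps : List Int) (v : List Int) :
    (ps.foldl pvBumpRc v).length = v.length := by
  induction ps generalizing v with
  | nil => rfl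
  | cons p ps ih => simp [List.foldl_cons, ih, pvBumpRc, PySem.List.length_pySetD]

lemma pv_fold_rc_getD (ps : List Int) (v : List Int) (j : Nat)
    (hps : ∀ p ∈ ps, 0 ≤ p ∧ p < v.length) :
    (ps.foldl pvBumpRc v).getD j 0 = v.getD j 0 + ps.count (j : Int) := by
  induction ps generalizing v with
  | nil => simp
  | cons p ps ih =>
    obtain ⟨hp0, hpl⟩ := hps p (List.mem_cons_self ..)
    have hlen : (pvBumpRc v p).length = v.length := by
      simp [pvBumpRc, PySem.List.length_pySetD]
    rw [List.foldl_cons, ih _ (by rw [hlen]; exact fun q hq => hps q (List.mem_cons_of_mem _ hq))]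
    have hset : pvBumpRc v p = v.set p.toNat (v[p.toNat] + 1) := by
      rw [pvBumpRc, PySem.List.pySetD_of_nonneg v _ hp0,
        PySem.List.pyGetD_eq_getElem v 0 hp0 hpl]
    rw [hset]
    by_cases hpj : p = (j : Int)
    · subst hpj
      have hjv : j < v.length := by exact_mod_cast hpl
      simp only [Int.toNat_natCast]
      rw [List.getD_eq_getElem _ _ (by simpa using hjv), List.getD_eq_getElem _ _ hjv,
        List.getElem_set_self]
      simp
      omega
    · have hne : (v.set p.toNat (v[p.toNat] + 1)).getD j 0 = v.getD j 0 := by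
        rw [List.getD_eq_getElem?_getD, List.getD_eq_getElem?_getD,
          List.getElem?_set_ne (by omega)]
      rw [hne]
      simp [hpj]

lemma pv_flatMap_singleton_map {α β : Type} (f : α → β) (l : List α) :
    l.flatMap (fun x => [f x]) = l.map f := by
  induction l with
  | nil => rfl
  | cons a l ih => simp [ih]

lemma pv_doc_len_rc (wl : List String) (doc : List String) (v : List Int) :
    (doc.foldl (fun v tok => ((pvBuildIndex wl).getD tok []).foldl pvBumpRc v) v).length = v.length := by
  induction doc generalizing v with
  | nil => rfl
  | cons tok doc ih => simp [List.foldl_cons, ih, pv_len_fold_rc]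

lemma pv_doc_rc_getD (wl : List String) (doc : List String) (v : List Int) (j : Nat)
    (hv : v.length = wl.length) (hj : j < wl.length) :
    (doc.foldl (fun v tok => ((pvBuildIndex wl).getD tok []).foldl pvBumpRc v) v).getD j 0
      = v.getD j 0 + (doc.count wl[j] : Int) := by
  induction doc generalizing v with
  | nil => simp
  | cons tok doc ih =>
    have hb : ∀ q ∈ (pvBuildIndex wl).getD tok [], 0 ≤ q ∧ q < v.length := by
      intro q hq
      rw [pv_index_getD] at hq
      have := pv_pos_bound wl tok q hq
      omega
    rw [List.foldl_cons, ih _ (by rw [pv_len_fold_rc]; exact hv),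
      pv_fold_rc_getD _ _ _ hb, pv_index_getD, pv_pos_count wl tok j hj]
    by_cases h : wl[j] = tok
    · simp only [List.count_cons, h, beq_self_eq_true, if_true]
      push_cast
      ring
    · have h2 : ¬ ((tok == wl[j]) = true) := by
        simpa using fun e => h e.symm
      simp [List.count_cons, h, h2]

lemma pv_docvec_rc (wl : List String) (doc : List String) :
    doc.foldl (fun v tok => ((pvBuildIndex wl).getD tok []).foldl pvBumpRc v) (List.replicate wl.length (0 : Int))
      = document_features_rc_port doc wl := by
  have hrhs : document_features_rc_port doc wl = wl.map (fun w => (doc.count w : Int)) := by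
    simp [document_features_rc_port, PySem.Dict.getD_counter]
    rw [← List.flatMap_def, pv_flatMap_singleton_map]
  rw [hrhs]
  apply List.ext_getElem
  · simp [pv_doc_len_rc]
  · intro j h1 h2
    have hj : j < wl.length := by simpa [pv_doc_len_rc] using h1
    rw [List.getElem_map, ← List.getD_eq_getElem _ (0 : Int) h1,
      pv_doc_rc_getD wl doc _ j (by simp) hj, List.getD_replicate _ hj]
    simp

-- ===== VERDICT (by name: the statement is the Claim_ definition above) =====
theorem create_training_feature_vectors_spec : Claim_equal_create_training_feature_vectors := by
  intro ts wl model _ hpre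
  unfold Pre_create_training_feature_vectors at hpre
  unfold Spec_create_training_feature_vectors
  unfold create_training_feature_vectors create_training_feature_vectors_alt
  by_cases hr : model = "rc"
  · subst hr
    simp [pv_docvec_rc]
  · simp [hpre, hr]
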